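-- pv_equiv track=rewrite | github.com/princetonafeezx/Password-Strength | password_strength/patterns.py | _has_monotonic_sequence
-- ===== SOURCE A (Python) =====
-- def _has_monotonic_sequence(password: str, step: int) -> bool:
--     """Return True if the password contains a 4-character monotonic sequence."""
--     lowered = password.casefold()
--     for index in range(len(lowered) - 3):
--         window = lowered[index : index + 4]
--         if not (
--             all(char.isalpha() for char in window)
--             or all(char.isdigit() for char in window)
--         ):
--             continue
--
--         differences = [
--             ord(window[offset + 1]) - ord(window[offset])
--             for offset in range(len(window) - 1)
--         ]
--         if all(difference == step for difference in differences):
--             return True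
--
--     return False
-- ===== SOURCE B (Python) =====
-- def _has_monotonic_sequence(password: str, step: int) -> bool:
--     """Return True if the password contains a 4-character monotonic sequence."""
--     lowered = password.casefold()
--     run = 1
--     for prev, cur in zip(lowered, lowered[1:]):
--         same_class = (prev.isalpha() and cur.isalpha()) or (
--             prev.isdigit() and cur.isdigit()
--         )
--         if same_class and ord(cur) - ord(prev) == step:
--             run += 1
--             if run >= 4:
--                 return True
--         else:
--             run = 1
--     return False
-- ===== Notes on version B (the rewrite author's own statement) =====
-- stated objective: simpler
-- what changed: Replaces the sliding-window rescan (slice each 4-char window, re-test its class and all three differences) by a single forward pass over adjacent pairs that maintains an integer run length, returning True as soon as the run reaches 4.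
import Mathlib
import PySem

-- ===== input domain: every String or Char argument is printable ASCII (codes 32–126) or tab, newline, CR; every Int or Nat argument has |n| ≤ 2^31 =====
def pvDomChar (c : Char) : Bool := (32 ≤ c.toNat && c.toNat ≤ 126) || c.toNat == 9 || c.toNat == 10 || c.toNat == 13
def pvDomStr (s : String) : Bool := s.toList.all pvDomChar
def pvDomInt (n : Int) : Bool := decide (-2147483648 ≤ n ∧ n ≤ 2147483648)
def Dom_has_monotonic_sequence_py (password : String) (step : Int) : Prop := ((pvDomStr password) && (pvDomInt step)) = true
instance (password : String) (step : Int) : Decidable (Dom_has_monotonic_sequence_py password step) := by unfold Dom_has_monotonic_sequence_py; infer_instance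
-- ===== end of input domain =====

-- B replaces A's per-index 4-char window rescan by one pass over adjacent pairs keeping a run length.
-- (.casefold() is ported as PySem.Chars.lower, exact on the printable-ASCII domain.)

-- ===== PORT A =====
-- the body of A's for-loop: 'continue' ↦ recurse on the remaining indices, 'return True' ↦ true
def hmsALoop (l : List Char) (step : Int) : List Int → Bool
  | [] => false
  | i :: rest =>
    let window := PySem.List.slice l (some i) (some (i + 4))
    if !(window.all PySem.Str.isalpha || window.all PySem.Str.isdigit) then
      hmsALoop l step rest
    else
      let differences := (PySem.List.pyRange 0 ((window.length : Int) - 1) 1).map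
        (fun offset => ((PySem.List.pyGetD window (offset + 1) ' ').toNat : Int)
                        - ((PySem.List.pyGetD window offset ' ').toNat : Int))
      if differences.all (fun difference => difference == step) then true
      else hmsALoop l step rest

def has_monotonic_sequence_py (password : String) (step : Int) : Bool :=
  let lowered := PySem.Chars.lower password.toList
  hmsALoop lowered step (PySem.List.pyRange 0 ((lowered.length : Int) - 3) 1)

-- ===== PORT B =====
-- same_class ∧ ord-difference test for one adjacent pair
def hmsPairOK (step : Int) (prev cur : Char) : Bool :=
  ((PySem.Str.isalpha prev && PySem.Str.isalpha cur)
    || (PySem.Str.isdigit prev && PySem.Str.isdigit cur))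
  && ((cur.toNat : Int) - (prev.toNat : Int) == step)

-- the 'for prev, cur in zip(lowered, lowered[1:])' pass with the run accumulator
def hmsBLoop (step : Int) (prev : Char) (run : Nat) : List Char → Bool
  | [] => false
  | cur :: rest =>
    if hmsPairOK step prev cur then
      if run + 1 ≥ 4 then true else hmsBLoop step cur (run + 1) rest
    else hmsBLoop step cur 1 rest

def has_monotonic_sequence_py_alt (password : String) (step : Int) : Bool :=
  match PySem.Chars.lower password.toList with
  | [] => false
  | c :: rest => hmsBLoop step c 1 rest

-- ===== PRECONDITION & SPEC =====
def Spec_has_monotonic_sequence_py (password : String) (step : Int) (out : Bool) : Prop := out = has_monotonic_sequence_py_alt password step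
instance (password : String) (step : Int) (out : Bool) : Decidable (Spec_has_monotonic_sequence_py password step out) := by unfold Spec_has_monotonic_sequence_py; infer_instance

-- ===== CLAIM (what is proved, stated in full; the proofs are below) =====
def Claim_equal_has_monotonic_sequence_py : Prop := ∀ (password : String) (step : Int), Dom_has_monotonic_sequence_py password step → Spec_has_monotonic_sequence_py password step (has_monotonic_sequence_py password step)

-- ===== LEMMAS AND PROOFS =====

-- reference predicate: some 4-char window is a same-class monotonic chain
def hmsWin (step : Int) : List Char → Bool
  | a :: b :: c :: d :: rest =>
      (hmsPairOK step a b && hmsPairOK step b c && hmsPairOK step c d)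
        || hmsWin step (b :: c :: d :: rest)
  | _ => false

-- A's per-window test, as a function of the window alone
def hmsCheckW (step : Int) (window : List Char) : Bool :=
  (window.all PySem.Str.isalpha || window.all PySem.Str.isdigit)
  && ((PySem.List.pyRange 0 ((window.length : Int) - 1) 1).map
        (fun offset => ((PySem.List.pyGetD window (offset + 1) ' ').toNat : Int)
                        - ((PySem.List.pyGetD window offset ' ').toNat : Int))).all
      (fun difference => difference == step)

theorem hms_any_congr {α : Type} (l : List α) (p q : α → Bool) (h : ∀ x, p x = q x) :
    l.any p = l.any q := by
  induction l with
  | nil => rfl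
  | cons x xs ih => simp [List.any_cons, h, ih]

theorem hmsALoop_eq_any (l : List Char) (step : Int) (is : List Int) :
    hmsALoop l step is
      = is.any (fun i => hmsCheckW step (PySem.List.slice l (some i) (some (i + 4)))) := by
  induction is with
  | nil => rfl
  | cons i rest ih =>
    rw [List.any_cons]
    simp only [hmsALoop]
    rw [ih]
    cases h1 : ((PySem.List.slice l (some i) (some (i + 4))).all PySem.Str.isalpha
        || (PySem.List.slice l (some i) (some (i + 4))).all PySem.Str.isdigit) <;>
    cases h2 : ((PySem.List.pyRange 0
          (((PySem.List.slice l (some i) (some (i + 4))).length : Int) - 1) 1).map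
        (fun offset =>
          ((PySem.List.pyGetD (PySem.List.slice l (some i) (some (i + 4))) (offset + 1) ' ').toNat : Int)
            - ((PySem.List.pyGetD (PySem.List.slice l (some i) (some (i + 4))) offset ' ').toNat : Int))).all
        (fun difference => difference == step) <;>
    simp [hmsCheckW, h1, h2]

theorem hms_alpha_not_digit (c : Char) (h : PySem.Chars.isalpha c = true) :
    PySem.Chars.isdigit c = false := by
  cases hd : PySem.Chars.isdigit c with
  | false => rfl
  | true =>
    exfalso
    simp only [PySem.Chars.isdigit, Bool.and_eq_true, decide_eq_true_eq] at hd
    simp only [PySem.Chars.isalpha, PySem.Chars.isupper, PySem.Chars.islower,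
      Bool.or_eq_true, Bool.and_eq_true, decide_eq_true_eq] at h
    rcases h with ⟨h1, _⟩ | ⟨h1, _⟩ <;> exact absurd (le_trans h1 hd.2) (by decide)

theorem hms_chain_class (a b c d : Char)
    (h1 : (PySem.Chars.isalpha a = true ∧ PySem.Chars.isalpha b = true)
        ∨ (PySem.Chars.isdigit a = true ∧ PySem.Chars.isdigit b = true))
    (h2 : (PySem.Chars.isalpha b = true ∧ PySem.Chars.isalpha c = true)
        ∨ (PySem.Chars.isdigit b = true ∧ PySem.Chars.isdigit c = true))
    (h3 : (PySem.Chars.isalpha c = true ∧ PySem.Chars.isalpha d = true)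
        ∨ (PySem.Chars.isdigit c = true ∧ PySem.Chars.isdigit d = true)) :
    (PySem.Chars.isalpha a = true ∧ PySem.Chars.isalpha b = true
      ∧ PySem.Chars.isalpha c = true ∧ PySem.Chars.isalpha d = true)
    ∨ (PySem.Chars.isdigit a = true ∧ PySem.Chars.isdigit b = true
      ∧ PySem.Chars.isdigit c = true ∧ PySem.Chars.isdigit d = true) := by
  rcases h1 with ⟨ha, hb⟩ | ⟨ha, hb⟩
  · left
    rcases h2 with ⟨_, hc⟩ | ⟨hb', _⟩
    · rcases h3 with ⟨_, hd⟩ | ⟨hc', _⟩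
      · exact ⟨ha, hb, hc, hd⟩
      · exact absurd hc' (by simp [hms_alpha_not_digit _ hc])
    · exact absurd hb' (by simp [hms_alpha_not_digit _ hb])
  · right
    rcases h2 with ⟨hb', _⟩ | ⟨_, hc⟩
    · exact absurd hb (by simp [hms_alpha_not_digit _ hb'])
    · rcases h3 with ⟨hc', _⟩ | ⟨_, hd⟩
      · exact absurd hc (by simp [hms_alpha_not_digit _ hc'])
      · exact ⟨ha, hb, hc, hd⟩

-- A's window test on a full 4-char window equals B's chain of pair tests
theorem hmsCheckW_quad (step : Int) (a b c d : Char) :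
    hmsCheckW step [a, b, c, d]
      = (hmsPairOK step a b && hmsPairOK step b c && hmsPairOK step c d) := by
  have hR : ((([a, b, c, d] : List Char).length : Int) - 1) = 3 := by simp
  have e10 : PySem.List.pyGetD [a, b, c, d] 0 ' ' = a := by
    norm_num [PySem.List.pyGetD, PySem.List.pyGet?, PySem.List.pyIdx?] <;> rfl
  have e11 : PySem.List.pyGetD [a, b, c, d] (0 + 1) ' ' = b := by
    norm_num [PySem.List.pyGetD, PySem.List.pyGet?, PySem.List.pyIdx?] <;> rfl
  have e20 : PySem.List.pyGetD [a, b, c, d] 1 ' ' = b := by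
    norm_num [PySem.List.pyGetD, PySem.List.pyGet?, PySem.List.pyIdx?] <;> rfl
  have e21 : PySem.List.pyGetD [a, b, c, d] (1 + 1) ' ' = c := by
    norm_num [PySem.List.pyGetD, PySem.List.pyGet?, PySem.List.pyIdx?] <;> rfl
  have e30 : PySem.List.pyGetD [a, b, c, d] 2 ' ' = c := by
    norm_num [PySem.List.pyGetD, PySem.List.pyGet?, PySem.List.pyIdx?] <;> rfl
  have e31 : PySem.List.pyGetD [a, b, c, d] (2 + 1) ' ' = d := by
    norm_num [PySem.List.pyGetD, PySem.List.pyGet?, PySem.List.pyIdx?] <;> rfl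
  unfold hmsCheckW
  rw [hR, show PySem.List.pyRange 0 3 1 = [0, 1, 2] from by decide]
  simp only [List.map_cons, List.map_nil, e10, e11, e20, e21, e30, e31]
  rw [Bool.eq_iff_iff]
  simp only [hmsPairOK, PySem.Str.isalpha, PySem.Str.isdigit, List.all_cons, List.all_nil,
    Bool.and_true, Bool.and_eq_true, Bool.or_eq_true, beq_iff_eq]
  constructor
  · rintro ⟨hcl, hd1, hd2, hd3⟩
    rcases hcl with ⟨ha, hb, hc, hd⟩ | ⟨ha, hb, hc, hd⟩
    · exact ⟨⟨⟨Or.inl ⟨ha, hb⟩, hd1⟩, ⟨Or.inl ⟨hb, hc⟩, hd2⟩⟩, ⟨Or.inl ⟨hc, hd⟩, hd3⟩⟩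
    · exact ⟨⟨⟨Or.inr ⟨ha, hb⟩, hd1⟩, ⟨Or.inr ⟨hb, hc⟩, hd2⟩⟩, ⟨Or.inr ⟨hc, hd⟩, hd3⟩⟩
  · rintro ⟨⟨⟨hc1, hd1⟩, ⟨hc2, hd2⟩⟩, ⟨hc3, hd3⟩⟩
    exact ⟨hms_chain_class a b c d hc1 hc2 hc3, hd1, hd2, hd3⟩

-- slice xs [j : j+4] is take 4 (drop j xs), for a Nat-cast start
theorem hms_slice4 {α : Type} (xs : List α) (j : Nat) :
    PySem.List.slice xs (some (j : Int)) (some ((j : Int) + 4)) = List.take 4 (List.drop j xs) := by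
  have h := PySem.List.slice_natCast_add xs j 4
  push_cast at h
  exact h

theorem hms_any_eq_win (step : Int) (l : List Char) :
    (PySem.List.pyRange 0 ((l.length : Int) - 3) 1).any
        (fun i => hmsCheckW step (PySem.List.slice l (some i) (some (i + 4))))
      = hmsWin step l := by
  induction l with
  | nil =>
    rw [show ((([] : List Char).length : Int) - 3) = -3 by simp,
      PySem.List.pyRange_one_eq_nil (by norm_num)]
    rfl
  | cons a l ih =>
    rcases l with _ | ⟨b, _ | ⟨c, _ | ⟨d, r⟩⟩⟩
    · rw [show ((([a] : List Char).length : Int) - 3) = -2 by simp,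
        PySem.List.pyRange_one_eq_nil (by norm_num)]
      rfl
    · rw [show ((([a, b] : List Char).length : Int) - 3) = -1 by simp,
        PySem.List.pyRange_one_eq_nil (by norm_num)]
      rfl
    · rw [show ((([a, b, c] : List Char).length : Int) - 3) = 0 by simp,
        PySem.List.pyRange_one_eq_nil (by norm_num)]
      rfl
    · have hlen : (((a :: b :: c :: d :: r).length : Int) - 3) = ((r.length + 1 : Nat) : Int) := by
        simp [List.length]; push_cast; omega
      have hlen2 : (((b :: c :: d :: r).length : Int) - 3) = ((r.length : Nat) : Int) := by
        simp [List.length]; push_cast; omega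
      rw [hlen2, PySem.List.pyRange_zero_natCast, List.any_map] at ih
      rw [hlen, PySem.List.pyRange_zero_natCast, List.any_map, List.range_succ_eq_map,
        List.any_cons, List.any_map]
      have h0 : (fun i => hmsCheckW step
            (PySem.List.slice (a :: b :: c :: d :: r) (some i) (some (i + 4))))
            (((0 : Nat) : Int))
          = (hmsPairOK step a b && hmsPairOK step b c && hmsPairOK step c d) := by
        simp only [hms_slice4]
        simp only [List.drop_zero, List.take_succ_cons, List.take_zero]
        exact hmsCheckW_quad step a b c d
      rw [show ((fun i => hmsCheckW step (PySem.List.slice (a :: b :: c :: d :: r) (some i) (some (i + 4)))) ∘ fun k => ((k : Nat) : Int)) 0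
            = (hmsPairOK step a b && hmsPairOK step b c && hmsPairOK step c d) from h0]
      have hshift : ∀ k : Nat,
          (((fun i => hmsCheckW step (PySem.List.slice (a :: b :: c :: d :: r) (some i) (some (i + 4)))) ∘ fun k => ((k : Nat) : Int)) ∘ Nat.succ) k
            = ((fun i => hmsCheckW step (PySem.List.slice (b :: c :: d :: r) (some i) (some (i + 4)))) ∘ fun k => ((k : Nat) : Int)) k := by
        intro k
        simp only [Function.comp_apply, hms_slice4]
        rfl
      rw [hms_any_congr _ _ _ hshift, ih]
      rfl

def hmsChain (step : Int) : Nat → Char → List Char → Bool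
  | 0, _, _ => true
  | _ + 1, _, [] => false
  | k + 1, p, c :: r => hmsPairOK step p c && hmsChain step k c r

theorem hmsChain_mono (step : Int) (l : List Char) : ∀ (k k' : Nat) (p : Char), k' ≤ k →
    hmsChain step k p l = true → hmsChain step k' p l = true := by
  induction l with
  | nil =>
    intro k k' p hk h
    cases k with
    | zero => interval_cases k' <;> exact h
    | succ n => exact absurd h (by simp [hmsChain])
  | cons c r ih =>
    intro k k' p hk h
    cases k' with
    | zero => rfl
    | succ n' =>
      cases k with
      | zero => omega
      | succ n =>
        simp only [hmsChain, Bool.and_eq_true] at h ⊢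
        exact ⟨h.1, ih n n' c (by omega) h.2⟩

theorem hmsWin_cons (step : Int) (a : Char) (l : List Char) :
    hmsWin step (a :: l) = (hmsChain step 3 a l || hmsWin step l) := by
  rcases l with _ | ⟨b, _ | ⟨c, _ | ⟨d, r⟩⟩⟩ <;>
    simp [hmsWin, hmsChain, Bool.and_assoc]

theorem hmsBLoop_eq (step : Int) (l : List Char) : ∀ (prev : Char) (run : Nat),
    1 ≤ run → run ≤ 3 →
    hmsBLoop step prev run l = (hmsChain step (4 - run) prev l || hmsWin step l) := by
  induction l with
  | nil =>
    intro prev run h1 h3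
    rw [show 4 - run = (3 - run) + 1 by omega]
    simp [hmsBLoop, hmsChain, hmsWin]
  | cons c r ih =>
    intro prev run h1 h3
    rw [show 4 - run = (3 - run) + 1 by omega]
    simp only [hmsBLoop, hmsChain]
    cases hp : hmsPairOK step prev c with
    | false =>
      simp only [hp, Bool.false_eq_true, if_false, Bool.false_and, Bool.false_or]
      rw [ih c 1 (by omega) (by omega), hmsWin_cons]
    | true =>
      simp only [hp, eq_self_iff_true, if_true, Bool.true_and]
      by_cases hr : run + 1 ≥ 4
      · rw [if_pos hr, show 3 - run = 0 by omega]
        simp [hmsChain]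
      · rw [if_neg hr, ih c (run + 1) (by omega) (by omega), hmsWin_cons,
          show 4 - (run + 1) = 3 - run by omega]
        cases h3' : hmsChain step 3 c r with
        | false => simp
        | true => simp [hmsChain_mono step r 3 (3 - run) c (by omega) h3']

-- ===== VERDICT (by name: the statement is the Claim_ definition above) =====
theorem has_monotonic_sequence_py_spec : Claim_equal_has_monotonic_sequence_py := by
  intro password step _
  unfold Spec_has_monotonic_sequence_py has_monotonic_sequence_py has_monotonic_sequence_py_alt
  simp only []
  rw [hmsALoop_eq_any, hms_any_eq_win]
  cases h : PySem.Chars.lower password.toList with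
  | nil => rfl
  | cons c rest =>
    show hmsWin step (c :: rest) = hmsBLoop step c 1 rest
    rw [hmsBLoop_eq step rest c 1 (by omega) (by omega), hmsWin_cons]
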